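-- pv_equiv track=rewrite | github.com/pwmcclung/codeWars2 | acro.py | acronym_buster
-- ===== SOURCE A (Python) =====
-- def acronym_buster(message):
--     acroDict = {'CTA':'call to action', 'EOD': 'the end of the day',
--                'IAM':'in a meeting', 'KPI':'key performance indicators', 'NRN':'no reply necessary',
--                'OOO': 'out of office', 'SWOT':'strengths, weaknesses, opportunities and threats',
--                'TBD': 'to be decided', 'WAH':'work at home'}
--     resultList = []
--     for words in message.split('.'):
--         temporaryList = []
--         for i, word in enumerate(words.split()):
--             if word.isupper() and len(word) >2:
--                 try:
--                     word = acroDict[word]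
--                 except KeyError:
--                     return ('{} is an acronym. I do not like acronyms. Please remove them from your email.'.format(word))
--             temporaryList.append(word[0].upper() + word[1:] if i == 0 else word)
--         resultList.append(' '.join(temporaryList))
--     return '. '.join(resultList).rstrip()
-- ===== SOURCE B (Python) =====
-- def acronym_buster(message):
--     acro = {'CTA': 'call to action', 'EOD': 'the end of the day',
--             'IAM': 'in a meeting', 'KPI': 'key performance indicators',
--             'NRN': 'no reply necessary', 'OOO': 'out of office',
--             'SWOT': 'strengths, weaknesses, opportunities and threats',
--             'TBD': 'to be decided', 'WAH': 'work at home'}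
--     sentences = [s.split() for s in message.split('.')]
--     # pass 1: find the first unknown all-caps token and bail out
--     for words in sentences:
--         for w in words:
--             if w.isupper() and len(w) > 2 and w not in acro:
--                 return '{} is an acronym. I do not like acronyms. Please remove them from your email.'.format(w)
--     # pass 2: rebuild, expanding acronyms and capitalizing each sentence start
--     def fix(words):
--         out = [acro.get(w, w) for w in words]
--         if out:
--             out[0] = out[0][0].upper() + out[0][1:]
--         return ' '.join(out)
--     return '. '.join(fix(words) for words in sentences).rstrip()
-- ===== Notes on version B (the rewrite author's own statement) =====
-- stated objective: alternative
-- what changed: A does one pass with an inline try/except KeyError and enumerate-based capitalization inside the rebuild loop; B separates concerns into two passes over the same split structure: a pure scan that returns the error for the first unknown all-caps token, then a rebuild by comprehension with dict.get substitution and capitalizing each sentence head.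
import Mathlib
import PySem

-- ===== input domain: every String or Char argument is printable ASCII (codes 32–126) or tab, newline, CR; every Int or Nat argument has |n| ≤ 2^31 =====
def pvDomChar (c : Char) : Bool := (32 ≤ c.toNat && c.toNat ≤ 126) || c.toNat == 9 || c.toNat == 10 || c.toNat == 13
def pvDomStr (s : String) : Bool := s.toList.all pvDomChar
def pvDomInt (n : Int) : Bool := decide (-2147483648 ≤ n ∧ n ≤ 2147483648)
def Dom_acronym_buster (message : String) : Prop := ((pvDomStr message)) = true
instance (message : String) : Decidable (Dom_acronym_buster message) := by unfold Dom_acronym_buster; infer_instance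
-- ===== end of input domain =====

-- B replaces A's single pass with inline try/except by two passes (error scan, then rebuild); same return value, no speed claim.

-- Shared literals/primitives both Pythons spell identically: the acronym dict,
-- the error format string, str.isupper (exact on the ASCII domain: some cased
-- character and no lowercase one), and word[0].upper() + word[1:].
def pvAcro : PySem.Dict String String :=
  PySem.Dict.ofList [("CTA", "call to action"), ("EOD", "the end of the day"),
    ("IAM", "in a meeting"), ("KPI", "key performance indicators"), ("NRN", "no reply necessary"),
    ("OOO", "out of office"), ("SWOT", "strengths, weaknesses, opportunities and threats"),
    ("TBD", "to be decided"), ("WAH", "work at home")]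

def pvErr (w : String) : String :=
  String.ofList (w.toList ++ " is an acronym. I do not like acronyms. Please remove them from your email.".toList)

-- word.isupper(): exact on the printable-ASCII domain, where cased = alphabetic
def pvIsUpper (w : String) : Bool :=
  w.toList.any PySem.Chars.isalpha && w.toList.all (fun c => ! PySem.Chars.islower c)

-- word[0].upper() + word[1:]; the [] case is unreachable (split() words and dict values are non-empty)
def pvCap (w : String) : String :=
  String.ofList (match w.toList with | [] => [] | c :: cs => PySem.Chars.upperChar c :: cs)

-- ===== PORT A =====
-- inner 'for i, word in enumerate(words.split())' with the early error return
def aInner : List String → Nat → Except String (List String)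
  | [], _ => .ok []
  | word :: rest, i =>
    if pvIsUpper word && decide (PySem.Str.len word > 2) then
      match pvAcro.get? word with
      | none => .error (pvErr word)
      | some rep =>
        match aInner rest (i + 1) with
        | .error e => .error e
        | .ok tl => .ok ((if i == 0 then pvCap rep else rep) :: tl)
    else
      match aInner rest (i + 1) with
      | .error e => .error e
      | .ok tl => .ok ((if i == 0 then pvCap word else word) :: tl)

-- outer 'for words in message.split('.')', building resultList
def aOuter : List String → Except String (List String)
  | [] => .ok []
  | s :: rest =>
    match aInner (PySem.Str.split₀ s) 0 with
    | .error e => .error e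
    | .ok tl =>
      match aOuter rest with
      | .error e => .error e
      | .ok rs => .ok (PySem.Str.join " " tl :: rs)

def acronym_buster (message : String) : String :=
  match aOuter ((PySem.Str.split? message ".").getD []) with
  | .error e => e
  | .ok l => PySem.Str.rstrip (PySem.Str.join ". " l)

-- ===== PORT B =====
-- pass 1 condition: w.isupper() and len(w) > 2 and w not in acro
def bCond (w : String) : Bool :=
  pvIsUpper w && decide (PySem.Str.len w > 2) && ! pvAcro.contains w

def bBadIn : List String → Option String
  | [] => none
  | w :: ws => if bCond w then some w else bBadIn ws

def bBad : List (List String) → Option String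
  | [] => none
  | ws :: rest =>
    match bBadIn ws with
    | some w => some w
    | none => bBad rest

-- pass 2: out = [acro.get(w, w) for w in words]; capitalize out[0]; ' '.join(out)
def bFix (ws : List String) : String :=
  let out := ws.map (fun w => (pvAcro.get? w).getD w)
  match out with
  | [] => PySem.Str.join " " []
  | o :: os => PySem.Str.join " " (pvCap o :: os)

def acronym_buster_alt (message : String) : String :=
  let sentences := ((PySem.Str.split? message ".").getD []).map PySem.Str.split₀
  match bBad sentences with
  | some w => pvErr w
  | none => PySem.Str.rstrip (PySem.Str.join ". " (sentences.map bFix))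

-- ===== PRECONDITION & SPEC =====
def Spec_acronym_buster (message : String) (out : String) : Prop := out = acronym_buster_alt message
instance (message : String) (out : String) : Decidable (Spec_acronym_buster message out) := by unfold Spec_acronym_buster; infer_instance

-- ===== CLAIM (what is proved, stated in full; the proofs are below) =====
def Claim_equal_acronym_buster : Prop := ∀ (message : String), Dom_acronym_buster message → Spec_acronym_buster message (acronym_buster message)

-- ===== LEMMAS AND PROOFS =====

-- the substitution pass 2 applies to each word
def pvSubst (w : String) : String := (pvAcro.get? w).getD w

-- what A's inner loop builds when no error fires: cap the head iff the loop started at i = 0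
def capList (i : Nat) : List String → List String
  | [] => []
  | w :: rest => (if i == 0 then pvCap (pvSubst w) else pvSubst w) :: rest.map pvSubst

theorem capList_pos (ws : List String) (i : Nat) (hi : i ≠ 0) : capList i ws = ws.map pvSubst := by
  cases ws <;> simp [capList, hi]

theorem pvAcro_items : pvAcro = PySem.Dict.mk [("CTA", "call to action"), ("EOD", "the end of the day"),
    ("IAM", "in a meeting"), ("KPI", "key performance indicators"), ("NRN", "no reply necessary"),
    ("OOO", "out of office"), ("SWOT", "strengths, weaknesses, opportunities and threats"),
    ("TBD", "to be decided"), ("WAH", "work at home")] := by decide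

-- every key of the dict satisfies A's replacement condition
theorem pvAcro_key_cond (w : String) (v : String) (h : pvAcro.get? w = some v) :
    (pvIsUpper w && decide (PySem.Str.len w > 2)) = true := by
  rw [pvAcro_items] at h
  simp only [PySem.Dict.get?_mk_cons, beq_iff_eq] at h
  split_ifs at h <;> first
    | (subst_vars; decide)
    | simp [PySem.Dict.get?] at h

theorem pvAcro_contains_eq (w : String) : pvAcro.contains w = (pvAcro.get? w).isSome := by
  simp [PySem.Dict.contains, PySem.Dict.get?, Option.isSome_map, List.isSome_find?]

theorem aInner_eq (ws : List String) (i : Nat) :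
    aInner ws i =
      match bBadIn ws with
      | some w => .error (pvErr w)
      | none => .ok (capList i ws) := by
  induction ws generalizing i with
  | nil => simp [aInner, bBadIn, capList]
  | cons w rest ih =>
    simp only [aInner, bBadIn]
    by_cases hc : (pvIsUpper w && decide (PySem.Str.len w > 2)) = true
    · cases hget : pvAcro.get? w with
      | none =>
        have hb : bCond w = true := by
          simp only [bCond, hc, Bool.true_and, pvAcro_contains_eq, hget, Option.isSome_none,
            Bool.not_false]
        simp only [hc, hb, reduceIte]
      | some rep =>
        have hb : bCond w = false := by simp [bCond, pvAcro_contains_eq, hget]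
        have hsub : pvSubst w = rep := by simp [pvSubst, hget]
        simp only [hc, hb, Bool.false_eq_true, reduceIte, ih (i + 1)]
        cases hbb : bBadIn rest <;> simp only [hbb] <;>
          rw [capList_pos rest (i + 1) (by omega)] <;> simp [capList, hsub]
    · have hc' : (pvIsUpper w && decide (PySem.Str.len w > 2)) = false := by
        simpa using hc
      have hget : pvAcro.get? w = none := by
        cases hg : pvAcro.get? w with
        | none => rfl
        | some v =>
          have hk := pvAcro_key_cond w v hg
          rw [hc'] at hk
          exact absurd hk (by decide)
      have hb : bCond w = false := by unfold bCond; rw [hc']; simp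
      have hsub : pvSubst w = w := by simp [pvSubst, hget]
      simp only [hc', hb, Bool.false_eq_true, reduceIte, ih (i + 1)]
      cases hbb : bBadIn rest <;> simp only [hbb] <;>
        rw [capList_pos rest (i + 1) (by omega)] <;> simp [capList, hsub]

theorem bFix_eq (ws : List String) : bFix ws = PySem.Str.join " " (capList 0 ws) := by
  have hfun : (fun w => (pvAcro.get? w).getD w) = pvSubst := rfl
  cases ws <;> simp [bFix, capList, hfun, pvSubst]

theorem aOuter_eq (ss : List String) :
    aOuter ss =
      match bBad (ss.map PySem.Str.split₀) with
      | some w => .error (pvErr w)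
      | none => .ok ((ss.map PySem.Str.split₀).map bFix) := by
  induction ss with
  | nil => simp [aOuter, bBad]
  | cons s rest ih =>
    simp only [aOuter, aInner_eq (PySem.Str.split₀ s) 0, ih, List.map_cons]
    cases hb : bBadIn (PySem.Str.split₀ s) with
    | some w => simp [bBad, hb]
    | none =>
      cases hbb : bBad (rest.map PySem.Str.split₀) <;>
        simp [bBad, hb, hbb, bFix_eq]

-- ===== VERDICT (by name: the statement is the Claim_ definition above) =====
theorem acronym_buster_spec : Claim_equal_acronym_buster := by
  intro message _
  unfold Spec_acronym_buster acronym_buster acronym_buster_alt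
  rw [aOuter_eq]
  cases h : bBad (((PySem.Str.split? message ".").getD []).map PySem.Str.split₀) <;> simp [h]
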